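-- pv_equiv track=rewrite | github.com/yuuichikaneko/Myportfolio | django/scraper/tasks.py | _pick_best_perf_entry
-- ===== SOURCE A (Python) =====
-- def _pick_best_perf_entry(candidates, vram_gb):
--     if not candidates:
--         return None
--     if vram_gb is not None:
--         exact = [entry for entry in candidates if entry.get("vram_gb") == vram_gb]
--         if exact:
--             return sorted(exact, key=lambda e: e.get("perf_score", 0), reverse=True)[0]
--     with_vram = [entry for entry in candidates if entry.get("vram_gb") is not None]
--     target = with_vram or candidates
--     return sorted(target, key=lambda e: e.get("perf_score", 0), reverse=True)[0]
-- ===== SOURCE B (Python) =====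
-- def _pick_best_perf_entry(candidates, vram_gb):
--     # One pass: keep the first entry maximising (tier, perf_score) lexicographically,
--     # tier 2 = exact vram match, 1 = has vram, 0 = no vram.
--     best = None
--     best_key = None
--     for entry in candidates:
--         v = entry.get("vram_gb")
--         if vram_gb is not None and v == vram_gb:
--             tier = 2
--         elif v is not None:
--             tier = 1
--         else:
--             tier = 0
--         key = (tier, entry.get("perf_score", 0))
--         if best is None or key > best_key:
--             best, best_key = entry, key
--     return best
-- ===== Notes on version B (the rewrite author's own statement) =====
-- stated objective: simpler
-- what changed: Replaced the three filter-then-stable-sort branches by a single pass keeping the first entry that maximises a composite (tier, perf_score) key, where tier encodes exact-vram / has-vram / no-vram precedence.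
-- outside the precondition, e.g. on _pick_best_perf_entry([{'perf_score': None}], None): A returns {'perf_score': None}, B returns {'perf_score': None}
import Mathlib
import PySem

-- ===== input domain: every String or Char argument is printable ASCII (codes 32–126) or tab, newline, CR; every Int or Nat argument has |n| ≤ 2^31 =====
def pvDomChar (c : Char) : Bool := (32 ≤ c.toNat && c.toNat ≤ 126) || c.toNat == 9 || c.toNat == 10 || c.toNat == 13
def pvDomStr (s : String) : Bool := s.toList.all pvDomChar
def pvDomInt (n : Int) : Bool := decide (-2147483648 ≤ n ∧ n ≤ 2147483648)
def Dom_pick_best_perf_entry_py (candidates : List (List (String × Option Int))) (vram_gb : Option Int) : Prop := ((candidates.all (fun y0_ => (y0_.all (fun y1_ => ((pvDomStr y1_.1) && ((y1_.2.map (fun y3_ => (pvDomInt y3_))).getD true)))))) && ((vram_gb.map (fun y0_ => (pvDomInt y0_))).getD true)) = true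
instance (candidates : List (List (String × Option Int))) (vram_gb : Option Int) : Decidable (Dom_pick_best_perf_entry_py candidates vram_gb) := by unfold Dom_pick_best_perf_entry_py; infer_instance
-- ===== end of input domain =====

-- B replaces A's three filter-then-stable-sort branches by one pass keeping the first
-- entry maximising a composite (tier, perf) key (objective: simpler).

-- ===== PORT A =====
-- entry.get(k): first match in the association list (Python dict lookup), default None
def pvGet (e : List (String × Option Int)) (k : String) : Option (Option Int) :=
  (e.find? (fun p => p.1 == k)).map (·.2)

-- entry.get("vram_gb")  (missing key and stored None both give Python None)
def pvVram (e : List (String × Option Int)) : Option Int :=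
  (pvGet e "vram_gb").getD none

-- entry.get("perf_score", 0); on Pre_ the stored value is never None, so this is exact there
def pvPerf (e : List (String × Option Int)) : Int :=
  match pvGet e "perf_score" with
  | some (some n) => n
  | _ => 0

def pick_best_perf_entry_py (candidates : List (List (String × Option Int))) (vram_gb : Option Int) : Option (List (String × Option Int)) :=
  if candidates.isEmpty then none
  else
    let exactRes : Option (List (String × Option Int)) :=
      if vram_gb.isSome then
        let exact := candidates.filter (fun e => decide (pvVram e = vram_gb))
        if !exact.isEmpty then (PySem.List.sorted exact pvPerf true).head? else none
      else none
    match exactRes with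
    | some r => some r
    | none =>
      let with_vram := candidates.filter (fun e => (pvVram e).isSome)
      let target := if !with_vram.isEmpty then with_vram else candidates
      (PySem.List.sorted target pvPerf true).head?

-- ===== PORT B =====
def pvTier (vram_gb : Option Int) (e : List (String × Option Int)) : Int :=
  if vram_gb.isSome && decide (pvVram e = vram_gb) then 2
  else if (pvVram e).isSome then 1
  else 0

-- Python tuple comparison key > best_key (lexicographic, both components ints on Pre_)
def pvLexGt (a b : Int × Int) : Bool := a.1 > b.1 || (a.1 == b.1 && a.2 > b.2)

def pick_best_perf_entry_py_alt (candidates : List (List (String × Option Int))) (vram_gb : Option Int) : Option (List (String × Option Int)) :=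
  (candidates.foldl
    (fun acc e =>
      let k : Int × Int := (pvTier vram_gb e, pvPerf e)
      match acc.1 with
      | none => (some e, k)
      | some _ => if pvLexGt k acc.2 then (some e, k) else acc)
    ((none : Option (List (String × Option Int))), ((0, 0) : Int × Int))).1

-- ===== PRECONDITION & SPEC =====
-- Pre_ excludes inputs where some entry binds "perf_score" to None: there Python's int-vs-None
-- comparisons make A's sort (and B's key comparison) raise TypeError on most such inputs, and
-- on the remaining degenerate ones A's returned value is an accident of which comparisons run.
def Pre_pick_best_perf_entry_py (candidates : List (List (String × Option Int))) (vram_gb : Option Int) : Prop :=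
  ∀ e ∈ candidates, pvGet e "perf_score" ≠ some none

instance (candidates : List (List (String × Option Int))) (vram_gb : Option Int) : Decidable (Pre_pick_best_perf_entry_py candidates vram_gb) := by unfold Pre_pick_best_perf_entry_py; infer_instance

def pvWitness_pick_best_perf_entry_py : (List (List (String × Option Int))) × Option Int :=
  ([[("vram_gb", some 8), ("perf_score", some 10)], [("perf_score", some 20)]], some 8)

def Spec_pick_best_perf_entry_py (candidates : List (List (String × Option Int))) (vram_gb : Option Int) (out : Option (List (String × Option Int))) : Prop := out = pick_best_perf_entry_py_alt candidates vram_gb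
instance (candidates : List (List (String × Option Int))) (vram_gb : Option Int) (out : Option (List (String × Option Int))) : Decidable (Spec_pick_best_perf_entry_py candidates vram_gb out) := by unfold Spec_pick_best_perf_entry_py; infer_instance

-- ===== CLAIM (what is proved, stated in full; the proofs are below) =====
def Claim_equal_pick_best_perf_entry_py : Prop := ∀ (candidates : List (List (String × Option Int))) (vram_gb : Option Int), Dom_pick_best_perf_entry_py candidates vram_gb → Pre_pick_best_perf_entry_py candidates vram_gb → Spec_pick_best_perf_entry_py candidates vram_gb (pick_best_perf_entry_py candidates vram_gb)

-- ===== LEMMAS AND PROOFS =====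

-- generic first-maximum folds (proof helpers)
def pvFoldPerf {α : Type} (p : α → Int) (b : α) (l : List α) : α :=
  l.foldl (fun b e => if p e > p b then e else b) b

def pvFirstMaxP? {α : Type} (p : α → Int) (l : List α) : Option α :=
  match l with
  | [] => none
  | h :: t => some (pvFoldPerf p h t)

def pvFoldLex {α : Type} (t p : α → Int) (b : α) (l : List α) : α :=
  l.foldl (fun b e => if pvLexGt (t e, p e) (t b, p b) then e else b) b

theorem pvFoldPerf_cons {α : Type} (p : α → Int) (b e : α) (l : List α) :
    pvFoldPerf p b (e :: l) = pvFoldPerf p (if p e > p b then e else b) l := rfl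

theorem pvFoldLex_cons {α : Type} (t p : α → Int) (b e : α) (l : List α) :
    pvFoldLex t p b (e :: l)
      = pvFoldLex t p (if pvLexGt (t e, p e) (t b, p b) then e else b) l := rfl

theorem pvFirstMaxP?_append {α : Type} (p : α → Int) (xs : List α) (x : α) :
    pvFirstMaxP? p (xs ++ [x])
      = some (match pvFirstMaxP? p xs with
              | none => x
              | some b => if p x > p b then x else b) := by
  cases xs with
  | nil => rfl
  | cons h t => simp [pvFirstMaxP?, pvFoldPerf, List.foldl_append]

theorem pvHead?_insertBy {α : Type} (bef : α → α → Bool) (x : α) (s : List α) :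
    (PySem.List.insertBy bef x s).head?
      = some (match s with | [] => x | y :: _ => if bef x y then x else y) := by
  cases s with
  | nil => rfl
  | cons y ys =>
    show (if bef x y = true then x :: y :: ys else y :: PySem.List.insertBy bef x ys).head? = _
    split <;> simp [*]

-- head of Python's stable reverse sort = first element with maximal key
theorem pvSortedRevHead {α : Type} (p : α → Int) (l : List α) :
    (PySem.List.sorted l p true).head? = pvFirstMaxP? p l := by
  induction l using List.reverseRecOn with
  | nil => rfl
  | append_singleton xs x ih =>
    rw [PySem.List.sorted_rev_eq_foldl_insertBy] at ih ⊢
    rw [List.foldl_append, List.foldl_cons, List.foldl_nil, pvHead?_insertBy,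
      pvFirstMaxP?_append]
    cases hS : List.foldl (fun acc x => PySem.List.insertBy (fun a b => decide (p b < p a)) x acc) [] xs with
    | nil =>
      have hxs : xs = [] := by
        have h := (PySem.List.sorted_eq_nil_iff xs p true)
        rw [PySem.List.sorted_rev_eq_foldl_insertBy] at h
        exact h.mp hS
      subst hxs; rfl
    | cons y ys =>
      rw [hS] at ih
      simp only [List.head?] at ih
      rw [← ih]
      simp [gt_iff_lt]

-- the two-component Python tuple comparison, componentwise
theorem pvLexGt_iff (a1 a2 b1 b2 : Int) :
    pvLexGt (a1, a2) (b1, b2) = true ↔ (b1 < a1 ∨ (a1 = b1 ∧ b2 < a2)) := by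
  simp [pvLexGt]

-- main key lemma: the lexicographic first-max over b::l is the perf first-max of the top tier
theorem pvKeyLemma {α : Type} (t p : α → Int) (m : Int) :
    ∀ (l : List α) (b : α), t b ≤ m → (∀ e ∈ l, t e ≤ m) →
      (t b = m ∨ ∃ e ∈ l, t e = m) →
      some (pvFoldLex t p b l) = pvFirstMaxP? p ((b :: l).filter (fun e => decide (t e = m))) := by
  intro l
  induction l with
  | nil =>
    intro b hb _ hex
    have hbm : t b = m := by
      rcases hex with h | ⟨e, he, _⟩
      · exact h
      · exact absurd he (by simp)
    simp [pvFoldLex, pvFirstMaxP?, pvFoldPerf, List.filter, hbm]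
  | cons e l ih =>
    intro b hb hall hex
    have he2 : t e ≤ m := hall e (List.mem_cons_self ..)
    have hall' : ∀ x ∈ l, t x ≤ m := fun x hx => hall x (List.mem_cons_of_mem _ hx)
    rw [pvFoldLex_cons]
    rcases eq_or_lt_of_le hb with hbm | hblt
    · -- t b = m
      rcases eq_or_lt_of_le he2 with hem | helt
      · -- both at top tier: lex comparison reduces to perf comparison
        have hcmp : pvLexGt (t e, p e) (t b, p b) = decide (p b < p e) := by
          simp [pvLexGt, hem, hbm, gt_iff_lt]
        rw [hcmp]
        have hb' : t (if decide (p b < p e) = true then e else b) = m := by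
          split <;> [exact hem; exact hbm]
        rw [ih _ (le_of_eq hb') hall' (Or.inl hb')]
        have h1 : (b :: e :: l).filter (fun x => decide (t x = m))
            = b :: e :: l.filter (fun x => decide (t x = m)) := by
          simp [List.filter_cons, hbm, hem]
        have hb2 : t (if p b < p e then e else b) = m := by
          split <;> [exact hem; exact hbm]
        have h2 : ((if decide (p b < p e) = true then e else b) :: l).filter (fun x => decide (t x = m))
            = (if decide (p b < p e) = true then e else b) :: l.filter (fun x => decide (t x = m)) := by
          simp [List.filter_cons, hb', hb2]
        rw [h1, h2]
        simp only [pvFirstMaxP?, pvFoldPerf_cons, Option.some.injEq]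
        congr 1
        by_cases hpe : p b < p e <;> simp [hpe, gt_iff_lt]
      · -- t b = m, t e < m: e never wins, e filtered out
        have hcmp : pvLexGt (t e, p e) (t b, p b) = false := by
          rw [Bool.eq_false_iff]; intro h
          rw [pvLexGt_iff] at h; omega
        rw [hcmp]
        simp only [Bool.false_eq_true, if_false]
        rw [ih _ hb hall' (Or.inl hbm)]
        have hne : ¬ t e = m := by omega
        congr 1
        simp [List.filter_cons, hbm, hne]
    · -- t b < m
      rcases eq_or_lt_of_le he2 with hem | helt
      · -- e reaches the top tier, b does not: e wins and b is filtered out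
        have hcmp : pvLexGt (t e, p e) (t b, p b) = true := by
          rw [pvLexGt_iff]; omega
        rw [hcmp, if_pos rfl]
        rw [ih _ (le_of_eq hem) hall' (Or.inl hem)]
        have hnb : ¬ t b = m := by omega
        congr 1
        simp [List.filter_cons, hem, hnb]
      · -- neither reaches the top tier: both filtered out, witness lies in l
        have hex' : ∃ x ∈ l, t x = m := by
          rcases hex with h | ⟨x, hx, hxm⟩
          · omega
          · rcases List.mem_cons.mp hx with rfl | hx'
            · omega
            · exact ⟨x, hx', hxm⟩
        have hb' : t (if pvLexGt (t e, p e) (t b, p b) = true then e else b) < m := by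
          split <;> assumption
        rw [ih _ (le_of_lt hb') hall' (Or.inr hex')]
        congr 1
        have h1 : ¬ t b = m := by omega
        have h2 : ¬ t e = m := by omega
        have h3 : ¬ t (if pvLexGt (t e, p e) (t b, p b) = true then e else b) = m := by omega
        simp [List.filter_cons, h1, h2, h3]

-- B's fold in closed form
theorem pvAltFold (vram_gb : Option Int) :
    ∀ (l : List (List (String × Option Int))) (b : List (String × Option Int)) (k : Int × Int),
      k = (pvTier vram_gb b, pvPerf b) →
      (l.foldl
        (fun acc e =>
          let k : Int × Int := (pvTier vram_gb e, pvPerf e)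
          match acc.1 with
          | none => (some e, k)
          | some _ => if pvLexGt k acc.2 then (some e, k) else acc)
        (some b, k)).1 = some (pvFoldLex (pvTier vram_gb) pvPerf b l) := by
  intro l
  induction l with
  | nil => intro b k hk; rfl
  | cons e l ih =>
    intro b k hk
    subst hk
    rw [List.foldl_cons, pvFoldLex_cons]
    cases hcmp : pvLexGt (pvTier vram_gb e, pvPerf e) (pvTier vram_gb b, pvPerf b) with
    | true => simp only [hcmp, if_true]; exact ih e _ rfl
    | false => simp only [hcmp, if_false]; exact ih b _ rfl

theorem pvAltClosed (candidates : List (List (String × Option Int))) (vram_gb : Option Int) :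
    pick_best_perf_entry_py_alt candidates vram_gb
      = match candidates with
        | [] => none
        | h :: t => some (pvFoldLex (pvTier vram_gb) pvPerf h t) := by
  cases candidates with
  | nil => rfl
  | cons h t =>
    unfold pick_best_perf_entry_py_alt
    rw [List.foldl_cons]
    exact pvAltFold vram_gb t h _ rfl

-- tiers are bounded by 2
theorem pvTier_le_two (vram_gb : Option Int) (e : List (String × Option Int)) :
    pvTier vram_gb e ≤ 2 := by
  unfold pvTier
  by_cases c1 : (vram_gb.isSome && decide (pvVram e = vram_gb)) = true
  · simp [c1]
  · by_cases c2 : (pvVram e).isSome = true <;> simp [c1, c2]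

theorem pvTier_eq_two_iff (vram_gb : Option Int) (e : List (String × Option Int)) :
    pvTier vram_gb e = 2 ↔ (vram_gb.isSome && decide (pvVram e = vram_gb)) = true := by
  unfold pvTier
  by_cases c1 : (vram_gb.isSome && decide (pvVram e = vram_gb)) = true
  · simp [c1]
  · by_cases c2 : (pvVram e).isSome = true <;> simp [c1, c2]

theorem pvTier_ne_two_le_one (vram_gb : Option Int) (e : List (String × Option Int))
    (h : pvTier vram_gb e ≠ 2) : pvTier vram_gb e ≤ 1 := by
  by_cases c1 : (vram_gb.isSome && decide (pvVram e = vram_gb)) = true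
  · exact absurd ((pvTier_eq_two_iff vram_gb e).mpr c1) h
  · unfold pvTier
    by_cases c2 : (pvVram e).isSome = true <;> simp [c1, c2]

theorem pvTier_eq_one_iff (vram_gb : Option Int) (e : List (String × Option Int))
    (h : pvTier vram_gb e ≠ 2) : pvTier vram_gb e = 1 ↔ (pvVram e).isSome = true := by
  by_cases c1 : (vram_gb.isSome && decide (pvVram e = vram_gb)) = true
  · exact absurd ((pvTier_eq_two_iff vram_gb e).mpr c1) h
  · unfold pvTier
    by_cases c2 : (pvVram e).isSome = true <;> simp [c1, c2]

theorem pvTier_eq_zero (vram_gb : Option Int) (e : List (String × Option Int))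
    (h2 : pvTier vram_gb e ≠ 2) (h1 : (pvVram e).isSome = false) : pvTier vram_gb e = 0 := by
  by_cases c1 : (vram_gb.isSome && decide (pvVram e = vram_gb)) = true
  · exact absurd ((pvTier_eq_two_iff vram_gb e).mpr c1) h2
  · unfold pvTier
    simp [c1, h1]

-- A's with_vram/target branch agrees with the lex fold when no entry has tier 2
theorem pvWithVramBranch (vram_gb : Option Int) (h : List (String × Option Int))
    (rest : List (List (String × Option Int)))
    (hno2 : ∀ e ∈ h :: rest, pvTier vram_gb e ≠ 2) :
    (let with_vram := (h :: rest).filter (fun e => (pvVram e).isSome)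
     let target := if !with_vram.isEmpty then with_vram else (h :: rest)
     (PySem.List.sorted target pvPerf true).head?)
      = some (pvFoldLex (pvTier vram_gb) pvPerf h rest) := by
  simp only
  by_cases hw : ((h :: rest).filter (fun e => (pvVram e).isSome)).isEmpty = true
  · -- no entry has vram: target = candidates, every tier is 0
    rw [hw]
    simp only [Bool.not_true, Bool.false_eq_true, if_false]
    rw [pvSortedRevHead]
    have hz : ∀ e ∈ h :: rest, pvTier vram_gb e = 0 := by
      intro e he
      refine pvTier_eq_zero _ _ (hno2 e he) ?_
      rw [List.isEmpty_iff, List.filter_eq_nil_iff] at hw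
      simpa using hw e he
    have hk := pvKeyLemma (pvTier vram_gb) pvPerf 0 rest h
        (le_of_eq (hz h (List.mem_cons_self ..)))
        (fun e he => le_of_eq (hz e (List.mem_cons_of_mem _ he)))
        (Or.inl (hz h (List.mem_cons_self ..)))
    rw [List.filter_eq_self.mpr (fun e he => by simp [hz e he])] at hk
    exact hk.symm
  · -- some entry has vram: target = with_vram = the tier-1 entries
    rw [Bool.not_eq_true] at hw
    rw [hw]
    simp only [Bool.not_false, if_true]
    rw [pvSortedRevHead]
    have hle1 : ∀ e ∈ h :: rest, pvTier vram_gb e ≤ 1 :=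
      fun e he => pvTier_ne_two_le_one _ _ (hno2 e he)
    have hfe : (h :: rest).filter (fun e => (pvVram e).isSome)
        = (h :: rest).filter (fun e => decide (pvTier vram_gb e = 1)) := by
      refine List.filter_congr (fun e he => ?_)
      have := pvTier_eq_one_iff vram_gb e (hno2 e he)
      rcases Bool.eq_false_or_eq_true (pvVram e).isSome with hh | hh <;> simp_all
    have hex : ∃ e ∈ h :: rest, pvTier vram_gb e = 1 := by
      have : (h :: rest).filter (fun e => (pvVram e).isSome) ≠ [] := by
        simpa [List.isEmpty_iff] using hw
      rcases List.exists_mem_of_ne_nil _ this with ⟨e, he⟩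
      rw [List.mem_filter] at he
      exact ⟨e, he.1, (pvTier_eq_one_iff vram_gb e (hno2 e he.1)).mpr he.2⟩
    have hor : pvTier vram_gb h = 1 ∨ ∃ e ∈ rest, pvTier vram_gb e = 1 := by
      rcases hex with ⟨e, he, hm⟩
      rcases List.mem_cons.mp he with rfl | he'
      · exact Or.inl hm
      · exact Or.inr ⟨e, he', hm⟩
    rw [hfe, ← pvKeyLemma (pvTier vram_gb) pvPerf 1 rest h
        (hle1 h (List.mem_cons_self ..))
        (fun e he => hle1 e (List.mem_cons_of_mem _ he)) hor]

-- ===== VERDICT (by name: the statement is the Claim_ definition above) =====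
theorem pick_best_perf_entry_py_spec : Claim_equal_pick_best_perf_entry_py := by
  intro candidates vram_gb _hDom _hPre
  unfold Spec_pick_best_perf_entry_py
  rw [pvAltClosed]
  cases candidates with
  | nil => rfl
  | cons h rest =>
    unfold pick_best_perf_entry_py
    simp only [List.isEmpty_cons, Bool.false_eq_true, if_false]
    by_cases hs : vram_gb.isSome = true
    · simp only [hs, if_true]
      by_cases hex : (!((h :: rest).filter (fun e => decide (pvVram e = vram_gb))).isEmpty) = true
      · -- exact is nonempty: A returns the best exact entry; tier-2 entries are exactly exact
        simp only [hex, if_true]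
        have hfe : (h :: rest).filter (fun e => decide (pvVram e = vram_gb))
            = (h :: rest).filter (fun e => decide (pvTier vram_gb e = 2)) := by
          refine List.filter_congr (fun e he => ?_)
          have h2 := pvTier_eq_two_iff vram_gb e
          rcases Bool.eq_false_or_eq_true (decide (pvVram e = vram_gb)) with hh | hh <;>
            simp_all
        have hexists : ∃ e ∈ h :: rest, pvTier vram_gb e = 2 := by
          have : (h :: rest).filter (fun e => decide (pvVram e = vram_gb)) ≠ [] := by
            simpa [List.isEmpty_iff] using hex
          rcases List.exists_mem_of_ne_nil _ this with ⟨e, he⟩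
          rw [List.mem_filter] at he
          refine ⟨e, he.1, (pvTier_eq_two_iff vram_gb e).mpr ?_⟩
          simp [hs, he.2]
        have hor : pvTier vram_gb h = 2 ∨ ∃ e ∈ rest, pvTier vram_gb e = 2 := by
          rcases hexists with ⟨e, he, hm⟩
          rcases List.mem_cons.mp he with rfl | he'
          · exact Or.inl hm
          · exact Or.inr ⟨e, he', hm⟩
        rw [pvSortedRevHead, hfe,
          ← pvKeyLemma (pvTier vram_gb) pvPerf 2 rest h (pvTier_le_two _ _)
            (fun e _ => pvTier_le_two _ _) hor]
      · -- exact is empty: no entry has tier 2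
        simp only [hex, Bool.false_eq_true, if_false]
        have hex' : ∀ e ∈ h :: rest, ¬ decide (pvVram e = vram_gb) = true := by
          rw [Bool.not_eq_true] at hex
          simpa [List.isEmpty_iff, List.filter_eq_nil_iff] using hex
        have hno2 : ∀ e ∈ h :: rest, pvTier vram_gb e ≠ 2 := by
          intro e he hc
          have := (pvTier_eq_two_iff vram_gb e).mp hc
          have hv : decide (pvVram e = vram_gb) = true := by
            rcases Bool.eq_false_or_eq_true (decide (pvVram e = vram_gb)) with hh | hh <;>
              simp_all
          exact absurd hv (hex' e he)
        exact pvWithVramBranch vram_gb h rest hno2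
    · -- vram_gb is None: only the with_vram branch, and no entry can have tier 2
      simp only [hs, Bool.false_eq_true, if_false]
      have hno2 : ∀ e ∈ h :: rest, pvTier vram_gb e ≠ 2 := by
        intro e _ hc
        have := (pvTier_eq_two_iff vram_gb e).mp hc
        simp_all
      exact pvWithVramBranch vram_gb h rest hno2
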